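-- pv_equiv track=rewrite | github.com/Kelios1556/delivery | spinkler.py | sprinkler_range
-- ===== SOURCE A (Python) =====
-- P = 4
--
-- def sprinkler_range(x, y, r):
--     P_x_min = x[0] - r[0]
--     P_x_max = x[0] + r[0]
--     P_y_min = y[0] - r[0]
--     P_y_max = y[0] + r[0]
--     for i in range(1, P):
--         if P_x_min > x[i] - r[i]: P_x_min = x[i] - r[i]
--         if P_x_max < x[i] + r[i]: P_x_max = x[i] + r[i]
--         if P_y_min > y[i] - r[i]: P_y_min = y[i] - r[i]
--         if P_y_max < y[i] + r[i]: P_y_max = y[i] + r[i]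
--     return P_x_min, P_x_max, P_y_min, P_y_max
-- ===== SOURCE B (Python) =====
-- P = 4
--
-- def sprinkler_range(x, y, r):
--     def box(i):
--         return (x[i] - r[i], x[i] + r[i], y[i] - r[i], y[i] + r[i])
--
--     def union(a, b):
--         return (min(a[0], b[0]), max(a[1], b[1]), min(a[2], b[2]), max(a[3], b[3]))
--
--     def hull(lo, hi):
--         if hi - lo == 1:
--             return box(lo)
--         m = (lo + hi) // 2
--         return union(hull(lo, m), hull(m, hi))
--
--     return hull(0, P)
-- ===== Notes on version B (the rewrite author's own statement) =====
-- stated objective: alternative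
-- what changed: Maps each sprinkler to its own bounding box and combines the boxes by a recursive divide-and-conquer union, instead of A's single index loop mutating four running extremes.
import Mathlib
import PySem

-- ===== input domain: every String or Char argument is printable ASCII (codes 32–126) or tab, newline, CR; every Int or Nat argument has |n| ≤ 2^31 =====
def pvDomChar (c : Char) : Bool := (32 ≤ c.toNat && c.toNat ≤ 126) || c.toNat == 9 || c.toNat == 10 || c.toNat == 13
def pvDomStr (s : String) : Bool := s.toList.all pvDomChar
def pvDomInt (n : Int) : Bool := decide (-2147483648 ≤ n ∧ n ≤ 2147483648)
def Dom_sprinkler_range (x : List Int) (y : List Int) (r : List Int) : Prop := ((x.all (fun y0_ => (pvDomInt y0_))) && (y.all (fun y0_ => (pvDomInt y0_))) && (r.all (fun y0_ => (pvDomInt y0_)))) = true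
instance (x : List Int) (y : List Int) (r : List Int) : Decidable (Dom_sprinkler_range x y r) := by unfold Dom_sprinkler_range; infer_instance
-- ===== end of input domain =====

-- B builds a bounding box per sprinkler and merges them by a recursive divide-and-conquer
-- union, instead of A's single index loop mutating four running extremes (objective: alternative).

-- ===== PORT A =====
-- indexing via pyGetD; Pre_ guarantees every index 0..3 is in range, where pyGetD = Python's xs[i]
def sprinkler_range (x : List Int) (y : List Int) (r : List Int) : Int × Int × Int × Int :=
  let s0 := (PySem.List.pyGetD x 0 0 - PySem.List.pyGetD r 0 0,
             PySem.List.pyGetD x 0 0 + PySem.List.pyGetD r 0 0,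
             PySem.List.pyGetD y 0 0 - PySem.List.pyGetD r 0 0,
             PySem.List.pyGetD y 0 0 + PySem.List.pyGetD r 0 0)
  (PySem.List.pyRange 1 4 1).foldl (fun s i =>
      let s1 := if s.1 > PySem.List.pyGetD x i 0 - PySem.List.pyGetD r i 0 then
                  PySem.List.pyGetD x i 0 - PySem.List.pyGetD r i 0 else s.1
      let s2 := if s.2.1 < PySem.List.pyGetD x i 0 + PySem.List.pyGetD r i 0 then
                  PySem.List.pyGetD x i 0 + PySem.List.pyGetD r i 0 else s.2.1
      let s3 := if s.2.2.1 > PySem.List.pyGetD y i 0 - PySem.List.pyGetD r i 0 then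
                  PySem.List.pyGetD y i 0 - PySem.List.pyGetD r i 0 else s.2.2.1
      let s4 := if s.2.2.2 < PySem.List.pyGetD y i 0 + PySem.List.pyGetD r i 0 then
                  PySem.List.pyGetD y i 0 + PySem.List.pyGetD r i 0 else s.2.2.2
      (s1, s2, s3, s4)) s0

-- ===== PORT B =====
-- Source B's box(i): the bounding box of sprinkler i
def pvBox (x y r : List Int) (i : Int) : Int × Int × Int × Int :=
  (PySem.List.pyGetD x i 0 - PySem.List.pyGetD r i 0,
   PySem.List.pyGetD x i 0 + PySem.List.pyGetD r i 0,
   PySem.List.pyGetD y i 0 - PySem.List.pyGetD r i 0,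
   PySem.List.pyGetD y i 0 + PySem.List.pyGetD r i 0)

-- Source B's union(a, b): smallest box containing both
def pvUnion (a b : Int × Int × Int × Int) : Int × Int × Int × Int :=
  (min a.1 b.1, max a.2.1 b.2.1, min a.2.2.1 b.2.2.1, max a.2.2.2 b.2.2.2)

-- Source B's hull(lo, hi): divide-and-conquer over the index range; the extra Nat fuel only
-- makes the recursion structurally terminating (never exhausted on the actual call hull 0 4)
def pvHull (x y r : List Int) : Nat → Int → Int → Int × Int × Int × Int
  | 0, lo, _ => pvBox x y r lo
  | Nat.succ f, lo, hi =>
      if hi - lo == 1 then pvBox x y r lo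
      else
        let m := PySem.Int.floordiv (lo + hi) 2
        pvUnion (pvHull x y r f lo m) (pvHull x y r f m hi)

def sprinkler_range_alt (x : List Int) (y : List Int) (r : List Int) : Int × Int × Int × Int :=
  pvHull x y r 4 0 4

-- ===== PRECONDITION & SPEC =====
-- A indexes x, y, r at 0..3 and raises IndexError on shorter lists; Pre_ excludes exactly those.
def Pre_sprinkler_range (x : List Int) (y : List Int) (r : List Int) : Prop :=
  4 ≤ x.length ∧ 4 ≤ y.length ∧ 4 ≤ r.length
instance (x : List Int) (y : List Int) (r : List Int) : Decidable (Pre_sprinkler_range x y r) := by unfold Pre_sprinkler_range; infer_instance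

def pvWitness_sprinkler_range : List Int × List Int × List Int :=
  ([0, 1, 2, 3], [1, -1, 2, -2], [1, 2, 1, 2])

def Spec_sprinkler_range (x : List Int) (y : List Int) (r : List Int) (out : Int × Int × Int × Int) : Prop := out = sprinkler_range_alt x y r
instance (x : List Int) (y : List Int) (r : List Int) (out : Int × Int × Int × Int) : Decidable (Spec_sprinkler_range x y r out) := by unfold Spec_sprinkler_range; infer_instance

-- ===== CLAIM (what is proved, stated in full; the proofs are below) =====
def Claim_equal_sprinkler_range : Prop := ∀ (x : List Int) (y : List Int) (r : List Int), Dom_sprinkler_range x y r → Pre_sprinkler_range x y r → Spec_sprinkler_range x y r (sprinkler_range x y r)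

-- ===== LEMMAS AND PROOFS =====
theorem pyGetD_cons4 (k : Int) (hk : k = 0 ∨ k = 1 ∨ k = 2 ∨ k = 3) (a b c d : Int) (t : List Int) :
    PySem.List.pyGetD (a :: b :: c :: d :: t) k 0 = [a, b, c, d].getD k.toNat 0 := by
  rcases hk with rfl | rfl | rfl | rfl <;>
    simp [PySem.List.pyGetD, PySem.List.pyGet?, PySem.List.pyIdx?] <;>
    rw [if_pos (by omega)] <;> simp

theorem hull_eval (x y r : List Int) :
    pvHull x y r 4 0 4 =
      pvUnion (pvUnion (pvBox x y r 0) (pvBox x y r 1))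
              (pvUnion (pvBox x y r 2) (pvBox x y r 3)) := by
  have f1 : PySem.Int.floordiv ((0:Int) + 4) 2 = 2 := by decide
  have f2 : PySem.Int.floordiv ((0:Int) + 2) 2 = 1 := by decide
  have f3 : PySem.Int.floordiv ((2:Int) + 4) 2 = 3 := by decide
  simp only [pvHull, f1, f2, f3]
  norm_num

-- ===== VERDICT (by name: the statement is the Claim_ definition above) =====
theorem sprinkler_range_spec : Claim_equal_sprinkler_range := by
  intro x y r _ hpre
  obtain ⟨hx, hy, hr⟩ := hpre
  match x, y, r with
  | x0 :: x1 :: x2 :: x3 :: tx, y0 :: y1 :: y2 :: y3 :: ty, r0 :: r1 :: r2 :: r3 :: tr =>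
    show _ = sprinkler_range_alt _ _ _
    have h1 : PySem.List.pyRange 1 4 1 = [1, 2, 3] := by decide
    have g0 := pyGetD_cons4 0 (by omega)
    have g1 := pyGetD_cons4 1 (by omega)
    have g2 := pyGetD_cons4 2 (by omega)
    have g3 := pyGetD_cons4 3 (by omega)
    rw [show sprinkler_range_alt (x0 :: x1 :: x2 :: x3 :: tx) (y0 :: y1 :: y2 :: y3 :: ty)
          (r0 :: r1 :: r2 :: r3 :: tr) = _ from congrArg id (hull_eval _ _ _)]
    simp only [id_eq, pvUnion, pvBox, g0, g1, g2, g3]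
    simp only [sprinkler_range, h1, List.foldl, g0, g1, g2, g3]
    norm_num [List.getD]
    refine ⟨?_, ?_, ?_, ?_⟩ <;>
      simp only [show Int.toNat 2 = 2 from rfl, show Int.toNat 3 = 3 from rfl,
        List.getElem_cons_zero, List.getElem_cons_succ, min_def, max_def] <;>
      split_ifs <;> omega
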